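-- pv_equiv track=rewrite | github.com/JulesCoop/NetSec-Firewall | format.py | to_string_format
-- ===== SOURCE A (Python) =====
-- import heapq
--
-- P_INDEX = 0
--
-- R_INDEX = 2
--
-- def validId(id):
--     """To check if a question with a specific id has a
--     corresponding rule or not.
--
--     Args:
--         id (str): id of the question
--     """
--     if id not in ["experienced", "server_exp"]:
--         return True
--     return False
--
-- def to_string_format(questions_dict, answers_dict):
--     """To convert the answers into the string
--     that will be written to the file.
--
--     Args:
--         questions_dict (dict): dictionary with the questions
--                 ids, the questions and their corresponding rules
--         answers_dict (dict) : dictionary with booleans for each question id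
--     """
--     #1. always the same initial part
--     final_string = "#iptables firewall implementation\n*filter\n\
-- :INPUT DROP [0:0]\n:FORWARD ACCEPT [0:0]\n:OUTPUT ACCEPT [0:0]\n"
--
--     #2. add all the rules in order
--
--     #rule that always goes first:
--     final_string += "-A INPUT -i lo -j ACCEPT\n"
--
--     #go through the answers and SORT THEM in a priority queue
--     pq = [] #new list to heapify
--     for id in answers_dict.keys():
--         if validId(id) and answers_dict[id]: #if the answer is yes
--             #add PRIORITY and RULE to pq (as a tuple)
--             heapq.heappush(pq, (questions_dict[id][P_INDEX], questions_dict[id][R_INDEX]))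
--
--     #go through the sorted list to add the rules in the right order
--     for i in range(len(pq)):
--         final_string += heapq.heappop(pq)[1]
--         final_string += "\n"
--
--
--     #rule that always goes last:
--     final_string += "-A INPUT -m conntrack --ctstate RELATED,ESTABLISHED -j ACCEPT\n"
--     #3. commit
--     final_string += "\nCOMMIT"
--
--     return final_string
-- ===== SOURCE B (Python) =====
-- P_INDEX = 0
--
-- R_INDEX = 2
--
-- def validId(id):
--     if id not in ["experienced", "server_exp"]:
--         return True
--     return False
--
-- def to_string_format(questions_dict, answers_dict):
--     """Collect the selected (priority, rule) pairs, sort them once, and join."""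
--     selected = sorted(
--         (questions_dict[id][P_INDEX], questions_dict[id][R_INDEX])
--         for id in answers_dict
--         if validId(id) and answers_dict[id]
--     )
--     body = "".join(rule + "\n" for _, rule in selected)
--     return ("#iptables firewall implementation\n*filter\n"
--             ":INPUT DROP [0:0]\n:FORWARD ACCEPT [0:0]\n:OUTPUT ACCEPT [0:0]\n"
--             "-A INPUT -i lo -j ACCEPT\n"
--             + body
--             + "-A INPUT -m conntrack --ctstate RELATED,ESTABLISHED -j ACCEPT\n"
--             "\nCOMMIT")
-- ===== Notes on version B (the rewrite author's own statement) =====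
-- stated objective: simpler
-- what changed: Replaced the heapq priority queue (heappush per selected id, then a heappop loop appending to the string) with one filter-and-collect pass, a single sorted() call on the (priority, rule) tuples, and a join; the fixed header/footer stay literals.
import Mathlib
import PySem

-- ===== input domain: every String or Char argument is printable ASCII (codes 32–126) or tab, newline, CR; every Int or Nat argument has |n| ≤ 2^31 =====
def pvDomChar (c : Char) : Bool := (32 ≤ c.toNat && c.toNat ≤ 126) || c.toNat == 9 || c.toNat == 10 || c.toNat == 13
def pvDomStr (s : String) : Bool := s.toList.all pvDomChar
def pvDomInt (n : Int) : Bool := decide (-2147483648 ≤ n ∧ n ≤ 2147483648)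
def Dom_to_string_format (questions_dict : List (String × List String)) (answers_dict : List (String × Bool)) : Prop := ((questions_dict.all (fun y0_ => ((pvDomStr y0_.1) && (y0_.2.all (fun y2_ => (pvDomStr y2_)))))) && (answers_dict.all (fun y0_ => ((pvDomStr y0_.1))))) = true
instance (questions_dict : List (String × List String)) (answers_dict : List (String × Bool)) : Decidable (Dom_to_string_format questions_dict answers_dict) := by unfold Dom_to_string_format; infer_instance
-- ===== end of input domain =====

-- B replaces A's heapq push/pop priority queue and string += loops by one filter+sort pass and a join (simpler; same result).


-- ===== PORT A =====
-- Heap items are the Python 2-tuples (priority, rule); Python compares tuples of strings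
-- lexicographically, which is exactly the linear order of `String ×ₗ String`.
abbrev PQItem := String ×ₗ String

def pvDflt : PQItem := toLex ("", "")

def pvValidId (id : String) : Bool :=
  if ¬ (id ∈ (["experienced", "server_exp"] : List String)) then true else false

-- hand port of CPython heapq._siftdown (exact step for step; heap reads are always in range,
-- so List.getD with a dummy default is the exact heap[parentpos])
def pvSiftdown (heap : List PQItem) (startpos pos : Nat) (newitem : PQItem) : List PQItem :=
  if _h : startpos < pos then
    let parentpos := (pos - 1) / 2
    let parent := heap.getD parentpos pvDflt
    if newitem < parent then
      pvSiftdown (heap.set pos parent) startpos parentpos newitem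
    else heap.set pos newitem
  else heap.set pos newitem
termination_by pos
decreasing_by omega

-- hand port of CPython heapq._siftup (exact step for step)
def pvSiftup (heap : List PQItem) (startpos pos : Nat) (newitem : PQItem) (endpos : Nat) : List PQItem :=
  let childpos := 2 * pos + 1
  if _h : childpos < endpos then
    let childpos' := if childpos + 1 < endpos ∧ ¬ (heap.getD childpos pvDflt < heap.getD (childpos + 1) pvDflt)
                     then childpos + 1 else childpos
    pvSiftup (heap.set pos (heap.getD childpos' pvDflt)) startpos childpos' newitem endpos
  else pvSiftdown (heap.set pos newitem) startpos pos newitem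
termination_by endpos - pos
decreasing_by split <;> omega

-- hand port of heapq.heappush: heap.append(item); _siftdown(heap, 0, len(heap)-1)
def pvHeappush (heap : List PQItem) (item : PQItem) : List PQItem :=
  pvSiftdown (heap ++ [item]) 0 heap.length item

-- hand port of heapq.heappop (none = IndexError on an empty heap, never reached by A's loop)
def pvHeappop (heap : List PQItem) : Option (PQItem × List PQItem) :=
  match heap.getLast? with
  | none => none
  | some lastelt =>
    let rest := heap.dropLast
    if rest.isEmpty then some (lastelt, [])
    else some (rest.getD 0 pvDflt, pvSiftup (rest.set 0 lastelt) 0 0 lastelt rest.length)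

-- A's pop loop: for i in range(len(pq)): final_string += heappop(pq)[1]; final_string += "\n"
def pvPopLoop (s : String) (heap : List PQItem) (n : Nat) : String :=
  match n with
  | 0 => s
  | Nat.succ m =>
    match pvHeappop heap with
    | none => s   -- Python would raise IndexError; never reached since n = len(pq)
    | some (item, heap') => pvPopLoop (s ++ (ofLex item).2 ++ "\n") heap' m

def to_string_format (questions_dict : List (String × List String)) (answers_dict : List (String × Bool)) : String :=
  let final1 := "#iptables firewall implementation\n*filter\n:INPUT DROP [0:0]\n:FORWARD ACCEPT [0:0]\n:OUTPUT ACCEPT [0:0]\n"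
  let final2 := final1 ++ "-A INPUT -i lo -j ACCEPT\n"
  let qd := PySem.Dict.ofList questions_dict
  let ad := PySem.Dict.ofList answers_dict
  let pq := ad.keys.foldl (fun pq id =>
      if pvValidId id && ad.getD id false then
        pvHeappush pq (toLex (PySem.List.pyGetD (qd.getD id []) 0 "", PySem.List.pyGetD (qd.getD id []) 2 ""))
      else pq) []
  let final3 := pvPopLoop final2 pq pq.length
  let final4 := final3 ++ "-A INPUT -m conntrack --ctstate RELATED,ESTABLISHED -j ACCEPT\n"
  final4 ++ "\nCOMMIT"

-- ===== PORT B =====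
def to_string_format_alt (questions_dict : List (String × List String)) (answers_dict : List (String × Bool)) : String :=
  let qd := PySem.Dict.ofList questions_dict
  let ad := PySem.Dict.ofList answers_dict
  let selected := PySem.List.sorted
      ((ad.keys.filter (fun id => pvValidId id && ad.getD id false)).map
        (fun id => (toLex (PySem.List.pyGetD (qd.getD id []) 0 "", PySem.List.pyGetD (qd.getD id []) 2 "") : PQItem)))
      (fun x => x) false
  let body := String.join (selected.map (fun p => (ofLex p).2 ++ "\n"))
  "#iptables firewall implementation\n*filter\n:INPUT DROP [0:0]\n:FORWARD ACCEPT [0:0]\n:OUTPUT ACCEPT [0:0]\n"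
    ++ ("-A INPUT -i lo -j ACCEPT\n"
    ++ (body
    ++ ("-A INPUT -m conntrack --ctstate RELATED,ESTABLISHED -j ACCEPT\n" ++ "\nCOMMIT")))

-- ===== PRECONDITION & SPEC =====
-- Pre_ excludes exactly the inputs where Python A raises: a selected answer id whose
-- questions_dict entry is missing (KeyError) or has fewer than 3 fields (IndexError).
def Pre_to_string_format (questions_dict : List (String × List String)) (answers_dict : List (String × Bool)) : Prop :=
  ∀ id ∈ (PySem.Dict.ofList answers_dict).keys,
    (pvValidId id && (PySem.Dict.ofList answers_dict).getD id false) = true →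
    2 < ((PySem.Dict.ofList questions_dict).getD id []).length
instance (questions_dict : List (String × List String)) (answers_dict : List (String × Bool)) : Decidable (Pre_to_string_format questions_dict answers_dict) := by unfold Pre_to_string_format; infer_instance

def pvWitness_to_string_format : (List (String × List String)) × (List (String × Bool)) :=
  ([("ssh", ["1", "allow ssh?", "-A INPUT -p tcp --dport 22 -j ACCEPT"]),
    ("ping", ["2", "allow ping?", "-A INPUT -p icmp -j ACCEPT"])],
   [("ssh", true), ("ping", true), ("experienced", true)])

def Spec_to_string_format (questions_dict : List (String × List String)) (answers_dict : List (String × Bool)) (out : String) : Prop := out = to_string_format_alt questions_dict answers_dict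
instance (questions_dict : List (String × List String)) (answers_dict : List (String × Bool)) (out : String) : Decidable (Spec_to_string_format questions_dict answers_dict out) := by unfold Spec_to_string_format; infer_instance

-- ===== CLAIM (what is proved, stated in full; the proofs are below) =====
def Claim_equal_to_string_format : Prop := ∀ (questions_dict : List (String × List String)) (answers_dict : List (String × Bool)), Dom_to_string_format questions_dict answers_dict → Pre_to_string_format questions_dict answers_dict → Spec_to_string_format questions_dict answers_dict (to_string_format questions_dict answers_dict)

-- ===== LEMMAS AND PROOFS =====

-- the binary-heap property, through List.getD (all reads are in range)
def pvIsHeap (h : List PQItem) : Prop :=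
  ∀ i j : Nat, j < h.length → (j = 2 * i + 1 ∨ j = 2 * i + 2) →
    h.getD i pvDflt ≤ h.getD j pvDflt

-- heap except that the edge into `pos` may be violated; children of `pos` already
-- dominate the value at `pos`'s parent (invariant of _siftdown's ascent)
def pvAlmostUp (v : List PQItem) (pos : Nat) : Prop :=
  (∀ i j : Nat, j < v.length → (j = 2 * i + 1 ∨ j = 2 * i + 2) → j ≠ pos →
      v.getD i pvDflt ≤ v.getD j pvDflt) ∧
  (∀ j : Nat, j < v.length → (j = 2 * pos + 1 ∨ j = 2 * pos + 2) → 0 < pos →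
      v.getD ((pos - 1) / 2) pvDflt ≤ v.getD j pvDflt)

-- heap with a hole at `pos` (invariant of _siftup's descent)
def pvAlmostDown (v : List PQItem) (pos : Nat) : Prop :=
  (∀ i j : Nat, j < v.length → (j = 2 * i + 1 ∨ j = 2 * i + 2) → i ≠ pos → j ≠ pos →
      v.getD i pvDflt ≤ v.getD j pvDflt) ∧
  (∀ j : Nat, j < v.length → (j = 2 * pos + 1 ∨ j = 2 * pos + 2) → 0 < pos →
      v.getD ((pos - 1) / 2) pvDflt ≤ v.getD j pvDflt)

theorem pv_getD_set_self {α : Type} (l : List α) (i : Nat) (a d : α) (h : i < l.length) :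
    (l.set i a).getD i d = a := by
  simp [List.getD, h]

theorem pv_getD_set_ne {α : Type} (l : List α) (i j : Nat) (a d : α) (h : i ≠ j) :
    (l.set i a).getD j d = l.getD j d := by
  simp [List.getD, h]

theorem pv_cons_set_perm {α : Type} : ∀ (t : List α) (k : Nat) (a d : α), k < t.length →
    (t.getD k d :: t.set k a).Perm (a :: t) := by
  intro t
  induction t with
  | nil => intro k a d h; simp at h
  | cons x s ih =>
    intro k a d h
    cases k with
    | zero => simp [List.getD]; exact List.Perm.swap _ _ _
    | succ m =>
      simp only [List.getD_cons_succ, List.set_cons_succ]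
      exact ((List.Perm.swap _ _ _).trans (List.Perm.cons x (ih m a d (by simpa using h)))).trans
        (List.Perm.swap _ _ _)

theorem pv_swap_cons_set {α : Type} : ∀ (t : List α) (m : Nat) (a x : α), m < t.length →
    (a :: t.set m x).Perm (x :: t.set m a) := by
  intro t
  induction t with
  | nil => intro m a x h; simp at h
  | cons y s ih =>
    intro m a x h
    cases m with
    | zero => simp only [List.set_cons_zero]; exact List.Perm.swap _ _ _
    | succ k =>
      simp only [List.set_cons_succ]
      exact ((List.Perm.swap _ _ _).trans (List.Perm.cons y (ih k a x (by simpa using h)))).trans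
        (List.Perm.swap _ _ _)

-- setting position j to the value read at i (i < j), then i to a, is a permutation of setting j to a
theorem pv_set_set_perm {α : Type} : ∀ (l : List α) (i j : Nat) (a d : α), i < j → j < l.length →
    ((l.set j (l.getD i d)).set i a).Perm (l.set j a) := by
  intro l
  induction l with
  | nil => intro i j a d hij h; simp at h
  | cons x t ih =>
    intro i j a d hij h
    cases i with
    | zero =>
      cases j with
      | zero => omega
      | succ m =>
        simp only [List.getD_cons_zero, List.set_cons_zero, List.set_cons_succ]
        exact pv_swap_cons_set t m a x (by simpa using h)
    | succ n =>
      cases j with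
      | zero => omega
      | succ m =>
        simp only [List.getD_cons_succ, List.set_cons_succ]
        exact List.Perm.cons x (ih n m a d (by omega) (by simpa using h))

-- mirrored version: set position i to the value read at j (i < j), then j to a
theorem pv_set_set_perm2 {α : Type} : ∀ (l : List α) (i j : Nat) (a d : α), i < j → j < l.length →
    ((l.set i (l.getD j d)).set j a).Perm (l.set i a) := by
  intro l
  induction l with
  | nil => intro i j a d hij h; simp at h
  | cons x t ih =>
    intro i j a d hij h
    cases i with
    | zero =>
      cases j with
      | zero => omega
      | succ m =>
        simp only [List.getD_cons_succ, List.set_cons_zero, List.set_cons_succ]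
        exact pv_cons_set_perm t m a d (by simpa using h)
    | succ n =>
      cases j with
      | zero => omega
      | succ m =>
        simp only [List.getD_cons_succ, List.set_cons_succ]
        exact List.Perm.cons x (ih n m a d (by omega) (by simpa using h))

theorem pv_siftdown_ok : ∀ (pos : Nat) (heap : List PQItem) (newitem : PQItem),
    pos < heap.length → pvAlmostUp (heap.set pos newitem) pos →
    pvIsHeap (pvSiftdown heap 0 pos newitem) ∧
    (pvSiftdown heap 0 pos newitem).Perm (heap.set pos newitem) := by
  intro pos
  induction pos using Nat.strong_induction_on with
  | _ pos ih =>
    intro heap newitem hlen hinv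
    obtain ⟨ha, hb⟩ := hinv
    by_cases hp : 0 < pos
    · have hpplt : (pos - 1) / 2 < pos := by omega
      by_cases hlt : newitem < heap.getD ((pos - 1) / 2) pvDflt
      · -- move parent down, recurse at parentpos
        rw [pvSiftdown]; simp only [dif_pos hp, if_pos hlt]
        set parentpos := (pos - 1) / 2 with hpp
        set parent := heap.getD parentpos pvDflt with hpar
        set heap' := heap.set pos parent with hheap'
        have hlen' : parentpos < heap'.length := by simp [hheap']; omega
        have hvk : ∀ k, k ≠ pos → (heap.set pos newitem).getD k pvDflt = heap.getD k pvDflt := by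
          intro k hk; exact pv_getD_set_ne heap pos k newitem pvDflt (fun h => hk h.symm)
        have hv'k : ∀ k, k ≠ pos → k ≠ parentpos →
            (heap'.set parentpos newitem).getD k pvDflt = heap.getD k pvDflt := by
          intro k h1 h2
          rw [pv_getD_set_ne _ _ _ _ _ (fun h => h2 h.symm), hheap',
            pv_getD_set_ne _ _ _ _ _ (fun h => h1 h.symm)]
        have hv'p : (heap'.set parentpos newitem).getD pos pvDflt = parent := by
          rw [pv_getD_set_ne _ _ _ _ _ (by omega), hheap', pv_getD_set_self _ _ _ _ hlen]
        have hv'pp : (heap'.set parentpos newitem).getD parentpos pvDflt = newitem := by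
          rw [pv_getD_set_self _ _ _ _ hlen']
        have hlenv : (heap.set pos newitem).length = heap.length := by simp
        have hlenv' : (heap'.set parentpos newitem).length = heap.length := by simp [hheap']
        have inv' : pvAlmostUp (heap'.set parentpos newitem) parentpos := by
          constructor
          · intro i j hj hedge hjne
            rw [hlenv'] at hj
            by_cases hjp : j = pos
            · have hi : i = parentpos := by subst hjp; omega
              rw [hjp, hv'p, hi, hv'pp]; exact le_of_lt hlt
            · by_cases hip : i = pos
              · rw [hip, hv'p, hv'k j hjp hjne]
                have := hb j (by rw [hlenv]; exact hj) (by omega) hp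
                rw [hvk j hjp, hvk parentpos (by omega)] at this
                rw [hpar]; exact this
              · by_cases hipp : i = parentpos
                · rw [hipp, hv'pp, hv'k j hjp hjne]
                  have := ha i j (by rw [hlenv]; exact hj) hedge hjp
                  rw [hvk j hjp, hvk i hip, hipp] at this
                  exact le_trans (le_of_lt hlt) this
                · rw [hv'k i hip hipp, hv'k j hjp hjne]
                  have := ha i j (by rw [hlenv]; exact hj) hedge hjp
                  rw [hvk j hjp, hvk i hip] at this; exact this
          · intro j hj hedge hppos
            rw [hlenv'] at hj
            have hglt : (parentpos - 1) / 2 < parentpos := by omega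
            have hgp : (parentpos - 1) / 2 ≠ pos := by omega
            have hgpp : (parentpos - 1) / 2 ≠ parentpos := by omega
            rw [hv'k _ hgp hgpp]
            have hgpar : heap.getD ((parentpos - 1) / 2) pvDflt ≤ parent := by
              have := ha ((parentpos - 1) / 2) parentpos (by rw [hlenv]; omega) (by omega) (by omega)
              rw [hvk _ (by omega), hvk _ (by omega)] at this; exact this
            by_cases hjp : j = pos
            · rw [hjp, hv'p]; exact hgpar
            · have hjpp : j ≠ parentpos := by omega
              rw [hv'k j hjp hjpp]
              have := ha parentpos j (by rw [hlenv]; exact hj) hedge hjp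
              rw [hvk j hjp, hvk parentpos (by omega)] at this
              exact le_trans hgpar this
        have := ih parentpos hpplt heap' newitem hlen' inv'
        refine ⟨this.1, this.2.trans ?_⟩
        -- (heap'.set parentpos newitem).Perm (heap.set pos newitem)
        have := pv_set_set_perm heap parentpos pos newitem pvDflt hpplt hlen
        rw [← hpar] at this
        exact this
      · -- parent ≤ newitem: place newitem, heap restored
        rw [pvSiftdown]; simp only [dif_pos hp, if_neg hlt]
        refine ⟨?_, List.Perm.refl _⟩
        intro i j hj hedge
        rw [List.length_set] at hj
        by_cases hjp : j = pos
        · have hi : i = (pos - 1) / 2 := by subst hjp; omega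
          rw [hjp, pv_getD_set_self _ _ _ _ hlen, hi,
            pv_getD_set_ne _ _ _ _ _ (by omega)]
          exact le_of_not_gt hlt
        · have := ha i j (by simpa using hj) hedge hjp
          exact this
    · -- pos = 0: no edge enters the root
      have hp0 : pos = 0 := by omega
      rw [pvSiftdown]; simp only [dif_neg hp]
      refine ⟨?_, List.Perm.refl _⟩
      intro i j hj hedge
      have hjne : j ≠ pos := by omega
      exact ha i j (by simpa using hj) hedge hjne

theorem pv_siftup_ok : ∀ (n : Nat) (heap : List PQItem) (pos : Nat) (newitem : PQItem),
    heap.length - pos = n → pos < heap.length → pvAlmostDown heap pos →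
    pvIsHeap (pvSiftup heap 0 pos newitem heap.length) ∧
    (pvSiftup heap 0 pos newitem heap.length).Perm (heap.set pos newitem) := by
  intro n
  induction n using Nat.strong_induction_on with
  | _ n ih =>
    intro heap pos newitem hn hlen hinv
    obtain ⟨ha, hb⟩ := hinv
    by_cases hch : 2 * pos + 1 < heap.length
    · -- descend to the preferred child
      rw [pvSiftup]; simp only [dif_pos hch]
      set c := if 2 * pos + 1 + 1 < heap.length ∧
          ¬ (heap.getD (2 * pos + 1) pvDflt < heap.getD (2 * pos + 1 + 1) pvDflt)
        then 2 * pos + 1 + 1 else 2 * pos + 1 with hc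
      have hcrange : c < heap.length ∧ (c = 2 * pos + 1 ∨ c = 2 * pos + 2) := by
        rw [hc]; split
        · next hcond => exact ⟨by omega, by omega⟩
        · exact ⟨hch, by omega⟩
      have hchoice : ∀ j, j < heap.length → (j = 2 * pos + 1 ∨ j = 2 * pos + 2) → j ≠ c →
          heap.getD c pvDflt ≤ heap.getD j pvDflt := by
        intro j hj hedge hjc
        rw [hc]; rw [hc] at hjc; split
        · next hcond =>
          rw [if_pos hcond] at hjc
          have hj' : j = 2 * pos + 1 := by omega
          rw [hj']; exact le_of_not_gt (fun hgt => hcond.2 hgt)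
        · next hcond =>
          rw [if_neg hcond] at hjc
          have hj' : j = 2 * pos + 2 := by omega
          have hjlen : 2 * pos + 1 + 1 < heap.length := by omega
          have := not_and.mp hcond hjlen
          rw [hj']
          exact le_of_lt (not_not.mp this)
      set heap' := heap.set pos (heap.getD c pvDflt) with hheap'
      have hlen' : heap'.length = heap.length := by simp [hheap']
      have hposc : pos < c := by omega
      have hv'c : ∀ k, k ≠ pos → heap'.getD k pvDflt = heap.getD k pvDflt := by
        intro k hk; rw [hheap', pv_getD_set_ne _ _ _ _ _ (fun h => hk h.symm)]
      have hv'pos : heap'.getD pos pvDflt = heap.getD c pvDflt := by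
        rw [hheap', pv_getD_set_self _ _ _ _ hlen]
      have inv' : pvAlmostDown heap' c := by
        constructor
        · intro i j hj hedge hic hjc
          rw [hlen'] at hj
          by_cases hjp : j = pos
          · have hppos : 0 < pos := by omega
            have hi : i = (pos - 1) / 2 := by subst hjp; omega
            have hip : i ≠ pos := by omega
            rw [hjp, hv'pos, hi, hv'c _ (by omega)]
            have := hb c hcrange.1 hcrange.2 hppos
            rw [hi] at *
            exact this
          · by_cases hip : i = pos
            · rw [hip, hv'pos, hv'c j hjp]
              exact hchoice j hj (hip ▸ hedge) hjc
            · rw [hv'c i hip, hv'c j hjp]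
              exact ha i j hj hedge hip hjp
        · intro j hj hedge _
          rw [hlen'] at hj
          have hparc : (c - 1) / 2 = pos := by omega
          have hjc : j ≠ c := by omega
          have hjp : j ≠ pos := by omega
          rw [hparc, hv'pos, hv'c j hjp]
          exact ha c j hj hedge (by omega) hjp
      have h1 : heap.length - c < n := by omega
      have h2 : heap'.length - c = heap.length - c := by rw [hlen']
      have h3 : c < heap'.length := by rw [hlen']; exact hcrange.1
      have hrec := ih (heap.length - c) h1 heap' c newitem h2 h3 inv'
      rw [hlen'] at hrec
      refine ⟨hrec.1, hrec.2.trans ?_⟩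
      -- (heap'.set c newitem).Perm (heap.set pos newitem)
      exact pv_set_set_perm2 heap pos c newitem pvDflt hposc hcrange.1
    · -- leaf: place newitem and sift it up
      rw [pvSiftup]; simp only [dif_neg hch]
      have hset : (heap.set pos newitem).set pos newitem = heap.set pos newitem := by
        rw [List.set_set]
      have hlenv : (heap.set pos newitem).length = heap.length := by simp
      have inv' : pvAlmostUp ((heap.set pos newitem).set pos newitem) pos := by
        rw [hset]
        constructor
        · intro i j hj hedge hjp
          rw [hlenv] at hj
          have hip : i ≠ pos := by
            intro hip; subst hip; omega
          rw [pv_getD_set_ne _ _ _ _ _ (fun h => hip h.symm),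
            pv_getD_set_ne _ _ _ _ _ (fun h => hjp h.symm)]
          exact ha i j hj hedge hip hjp
        · intro j hj hedge _
          rw [hlenv] at hj; omega
      have := pv_siftdown_ok pos (heap.set pos newitem) newitem (by simpa using hlen) inv'
      rw [hset] at this
      rw [show (heap.set pos newitem).length = heap.length from by simp] at *
      exact this

theorem pv_root_min (h : List PQItem) (hh : pvIsHeap h) :
    ∀ j : Nat, j < h.length → h.getD 0 pvDflt ≤ h.getD j pvDflt := by
  intro j
  induction j using Nat.strong_induction_on with
  | _ j ih =>
    intro hj
    by_cases hj0 : j = 0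
    · rw [hj0]
    · have hpar : (j - 1) / 2 < j := by omega
      have hedge : j = 2 * ((j - 1) / 2) + 1 ∨ j = 2 * ((j - 1) / 2) + 2 := by omega
      exact le_trans (ih _ hpar (by omega)) (hh _ j hj hedge)

theorem pv_set_concat {α : Type} : ∀ (h : List α) (a x : α),
    (h ++ [a]).set h.length x = h ++ [x] := by
  intro h
  induction h with
  | nil => intro a x; rfl
  | cons y t ih => intro a x; simp [ih]

theorem pv_push_ok (h : List PQItem) (x : PQItem) (hh : pvIsHeap h) :
    pvIsHeap (pvHeappush h x) ∧ (pvHeappush h x).Perm (x :: h) := by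
  have hlen : h.length < (h ++ [x]).length := by simp
  have hset : (h ++ [x]).set h.length x = h ++ [x] := pv_set_concat h x x
  have inv : pvAlmostUp ((h ++ [x]).set h.length x) h.length := by
    rw [hset]
    constructor
    · intro i j hj hedge hjp
      simp only [List.length_append, List.length_cons, List.length_nil] at hj
      have hjlt : j < h.length := by omega
      have hilt : i < h.length := by omega
      rw [List.getD_append _ _ _ _ hilt, List.getD_append _ _ _ _ hjlt]
      exact hh i j hjlt hedge
    · intro j hj hedge _
      simp only [List.length_append, List.length_cons, List.length_nil] at hj
      omega
  have := pv_siftdown_ok h.length (h ++ [x]) x hlen inv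
  rw [pvHeappush]
  refine ⟨this.1, this.2.trans ?_⟩
  rw [hset]
  exact List.perm_append_singleton x h

theorem pv_getD_concat_lt {α : Type} (l : List α) (a d : α) (k : Nat) (h : k < l.length) :
    (l ++ [a]).getD k d = l.getD k d := List.getD_append _ _ _ _ h

theorem pv_pop_ok (h : List PQItem) (hh : pvIsHeap h) (hne : h ≠ []) :
    ∃ m h', pvHeappop h = some (m, h') ∧ pvIsHeap h' ∧ (m :: h').Perm h ∧
      ∀ x ∈ h, m ≤ x := by
  have hmin : ∀ x ∈ h, h.getD 0 pvDflt ≤ x := by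
    intro x hx
    obtain ⟨k, hk, rfl⟩ := List.mem_iff_getElem.mp hx
    have := pv_root_min h hh k hk
    rwa [List.getD_eq_getElem h pvDflt hk] at this
  obtain ⟨l', last, hform⟩ := (List.eq_nil_or_concat h).resolve_left hne
  rw [List.concat_eq_append] at hform
  subst hform
  rw [pvHeappop]
  simp only [List.getLast?_concat, List.dropLast_concat]
  cases l' with
  | nil =>
    refine ⟨last, [], by simp, by intro i j hj _; simp at hj, by simp, ?_⟩
    intro x hx; simp at hx; rw [hx]
  | cons y t =>
    rw [if_neg (by simp)]
    have hlenset : ((y :: t).set 0 last).length = (y :: t).length := by simp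
    have inv : pvAlmostDown ((y :: t).set 0 last) 0 := by
      constructor
      · intro i j hj hedge hip hjp
        rw [hlenset] at hj
        rw [pv_getD_set_ne _ _ _ _ _ (fun hh' => hip hh'.symm),
          pv_getD_set_ne _ _ _ _ _ (fun hh' => hjp hh'.symm)]
        have hj2 : j < t.length + 1 := by simpa using hj
        have hilt : i < (y :: t).length := by simp; omega
        have := hh i j (by simp; omega) hedge
        rwa [pv_getD_concat_lt _ _ _ _ hilt, pv_getD_concat_lt _ _ _ _ (by omega)] at this
      · intro j hj hedge h0; omega
    have hs := pv_siftup_ok (((y :: t).set 0 last).length - 0) ((y :: t).set 0 last) 0 last rfl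
      (by simp) inv
    rw [List.set_set] at hs
    rw [hlenset] at hs
    refine ⟨(y :: t).getD 0 pvDflt, _, rfl, hs.1, ?_, ?_⟩
    · simp only [List.getD_cons_zero]
      refine (List.Perm.cons y hs.2).trans ?_
      simp only [List.set_cons_zero]
      refine List.Perm.cons y ?_
      exact (List.perm_append_singleton last t).symm
    · simpa using hmin

theorem pv_fold_push : ∀ (L : List PQItem) (acc : List PQItem), pvIsHeap acc →
    pvIsHeap (L.foldl pvHeappush acc) ∧ (L.foldl pvHeappush acc).Perm (L ++ acc) := by
  intro L
  induction L with
  | nil => intro acc hacc; exact ⟨hacc, by simp⟩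
  | cons x t ih =>
    intro acc hacc
    simp only [List.foldl_cons]
    have hpush := pv_push_ok acc x hacc
    have := ih (pvHeappush acc x) hpush.1
    refine ⟨this.1, this.2.trans ?_⟩
    exact (List.Perm.append_left t hpush.2).trans List.perm_middle

theorem pv_fold_extract : ∀ (l : List String) (s : String),
    l.foldl (· ++ ·) s = s ++ l.foldl (· ++ ·) "" := by
  intro l
  induction l with
  | nil => intro s; simp [List.foldl]
  | cons a t ih =>
    intro s
    simp only [List.foldl]
    rw [ih (s ++ a), ih ("" ++ a), String.append_assoc]
    simp

theorem pv_join_cons (a : String) (l : List String) :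
    String.join (a :: l) = a ++ String.join l := by
  simp only [String.join, List.foldl]
  rw [pv_fold_extract l ("" ++ a)]
  simp

theorem pv_popLoop_eq : ∀ (n : Nat) (h : List PQItem) (s : String),
    pvIsHeap h → h.length = n →
    pvPopLoop s h n =
      s ++ String.join ((PySem.List.sorted h (fun x => x) false).map (fun p => (ofLex p).2 ++ "\n")) := by
  intro n
  induction n with
  | zero =>
    intro h s hh hlen
    have : h = [] := List.eq_nil_of_length_eq_zero hlen
    subst this
    simp [pvPopLoop, PySem.List.sorted, String.join]
  | succ m ih =>
    intro h s hh hlen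
    have hne : h ≠ [] := by intro hnil; subst hnil; simp at hlen
    obtain ⟨mi, h', hpop, hh', hperm, hmin⟩ := pv_pop_ok h hh hne
    have hstep : pvPopLoop s h (m + 1) = pvPopLoop (s ++ (ofLex mi).2 ++ "\n") h' m := by
      rw [pvPopLoop, hpop]
    rw [hstep]
    have hlen' : h'.length = m := by
      have := hperm.length_eq; simp at this; omega
    rw [ih h' (s ++ (ofLex mi).2 ++ "\n") hh' hlen']
    have hsorted : PySem.List.sorted h (fun x => x) false = mi :: PySem.List.sorted h' (fun x => x) false := by
      apply PySem.List.sorted_id_eq_of_perm_of_pairwise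
      · exact (List.Perm.cons mi (PySem.List.sorted_perm h' (fun x => x) false)).trans hperm
      · constructor
        · intro b hb
          have hbh : b ∈ h' := by rw [PySem.List.mem_sorted] at hb; exact hb
          exact hmin b (hperm.mem_iff.mp (List.mem_cons_of_mem mi hbh))
        · have := PySem.List.sorted_pairwise h' (fun x => x)
          simpa using this
    rw [hsorted]
    simp only [List.map_cons]
    rw [pv_join_cons]
    simp only [String.append_assoc]

theorem pv_foldl_if_push : ∀ (keys : List String) (c : String → Bool) (f : String → PQItem)
    (acc : List PQItem),
    keys.foldl (fun pq id => if c id then pvHeappush pq (f id) else pq) acc =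
      ((keys.filter c).map f).foldl pvHeappush acc := by
  intro keys
  induction keys with
  | nil => intro c f acc; rfl
  | cons x t ih =>
    intro c f acc
    simp only [List.foldl_cons, List.filter_cons]
    by_cases hx : c x
    · simp only [hx, if_true, List.map_cons, List.foldl_cons]
      exact ih c f (pvHeappush acc (f x))
    · simp only [hx, if_false, Bool.false_eq_true]
      exact ih c f acc

-- ===== VERDICT (by name: the statement is the Claim_ definition above) =====
theorem to_string_format_spec : Claim_equal_to_string_format := by
  intro questions_dict answers_dict _hdom _hpre
  unfold Spec_to_string_format
  show to_string_format questions_dict answers_dict = to_string_format_alt questions_dict answers_dict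
  simp only [to_string_format, to_string_format_alt]
  rw [pv_foldl_if_push (PySem.Dict.ofList answers_dict).keys
    (fun id => pvValidId id && (PySem.Dict.ofList answers_dict).getD id false)
    (fun id => (toLex (PySem.List.pyGetD ((PySem.Dict.ofList questions_dict).getD id []) 0 "",
      PySem.List.pyGetD ((PySem.Dict.ofList questions_dict).getD id []) 2 "") : PQItem))]
  set L : List PQItem := (((PySem.Dict.ofList answers_dict).keys.filter
    (fun id => pvValidId id && (PySem.Dict.ofList answers_dict).getD id false)).map
    (fun id => (toLex (PySem.List.pyGetD ((PySem.Dict.ofList questions_dict).getD id []) 0 "",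
      PySem.List.pyGetD ((PySem.Dict.ofList questions_dict).getD id []) 2 "") : PQItem))) with hL
  have hheap := pv_fold_push L [] (by intro i j hj _; simp at hj)
  have hperm : (L.foldl pvHeappush []).Perm L := by simpa using hheap.2
  rw [pv_popLoop_eq (L.foldl pvHeappush []).length (L.foldl pvHeappush []) _ hheap.1 rfl]
  rw [PySem.List.sorted_eq_sorted_of_perm (L.foldl pvHeappush []) L (fun x => x)
    (fun a b h => h) hperm]
  simp only [String.append_assoc]
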